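-- pv_equiv track=rewrite | github.com/coma007/SIIT-materijali | 4. semestar/Upravljanje informacijama/VJEŽBE/07_Hadoop_MapReduce_1/implement_map_reduce.py | reduce_function_implementation
-- ===== SOURCE A (Python) =====
-- def dict_to_list_of_tuples(dicty):
--     list_of_tuples = []
--
--     # Ako imate python 3 umesto dict.iteritems() treba da stavite dict.items()
--     for key, value in dicty.items():
--         list_of_tuples.append((key, value))
--
--     return list_of_tuples
--
-- def shuffle_implementation(data):
--     data.sort(key=lambda x: x[0])
--     pass
--
-- def reduce_function_implementation(items):
--     shuffle_implementation(items)
--     total_count = {}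
--     for item in items:
--         if item[0] in total_count.keys():
--             total_count[item[0]] += item[1]
--         else:
--             total_count[item[0]] = item[1]
--     total_count_tuple = dict_to_list_of_tuples(total_count)
--     return total_count_tuple
-- ===== SOURCE B (Python) =====
-- def reduce_function_implementation(items):
--     # Divide-and-conquer: recursively aggregate each half, then merge the two
--     # key-sorted aggregated lists, summing values when keys collide.
--     # (No dict, no call to sort; unlike A it does not mutate `items`.)
--     def merge(l, r):
--         out = []
--         i = j = 0
--         while i < len(l) and j < len(r):
--             if l[i][0] < r[j][0]:
--                 out.append(l[i]); i += 1
--             elif r[j][0] < l[i][0]: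
--                 out.append(r[j]); j += 1
--             else:
--                 out.append((l[i][0], l[i][1] + r[j][1])); i += 1; j += 1
--         out.extend(l[i:])
--         out.extend(r[j:])
--         return out
--
--     def solve(xs):
--         if len(xs) <= 1:
--             return list(xs)
--         m = len(xs) // 2
--         return merge(solve(xs[:m]), solve(xs[m:]))
--
--     return solve(items)
-- ===== Notes on version B (the rewrite author's own statement) =====
-- stated objective: alternative
-- what changed: Replaces sort-then-dict-accumulate by a divide-and-conquer mergesort whose merge step itself sums values on equal keys, so no dict, no membership tests and no library sort are used; unlike A, B does not mutate its argument (the equivalence is about the return value).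
import Mathlib
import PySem

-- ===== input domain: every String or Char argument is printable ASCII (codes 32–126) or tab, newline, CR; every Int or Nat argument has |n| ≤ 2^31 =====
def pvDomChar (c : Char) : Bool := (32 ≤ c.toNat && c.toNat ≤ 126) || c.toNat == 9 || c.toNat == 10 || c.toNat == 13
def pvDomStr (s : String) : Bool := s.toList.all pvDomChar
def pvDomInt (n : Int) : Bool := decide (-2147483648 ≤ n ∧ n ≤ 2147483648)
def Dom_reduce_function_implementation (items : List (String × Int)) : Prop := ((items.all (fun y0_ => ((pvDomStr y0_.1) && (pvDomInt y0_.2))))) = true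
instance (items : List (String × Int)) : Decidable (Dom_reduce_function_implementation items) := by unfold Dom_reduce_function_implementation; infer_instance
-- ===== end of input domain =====

-- B replaces A's sort-then-dict-accumulate by a divide-and-conquer mergesort whose merge
-- step sums values on equal keys (alternative algorithm, same cost). A sorts `items` in
-- place and B does not: the equivalence proved here is about the RETURN value only.

-- ===== PORT A =====
-- dict_to_list_of_tuples: append each (key, value) of the dict to a fresh list
def pvDictToList (d : PySem.Dict String Int) : List (String × Int) :=
  d.items.foldl (fun l p => l ++ [p]) []

-- loop body: if item[0] in total_count.keys(): total_count[item[0]] += item[1] else: total_count[item[0]] = item[1]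
-- (the += reads the present value; under the contains-check getD 0 is exactly that value)
def pvReduceStepA (d : PySem.Dict String Int) (item : String × Int) : PySem.Dict String Int :=
  if d.contains item.1 then d.insert item.1 (d.getD item.1 0 + item.2)
  else d.insert item.1 item.2

def reduce_function_implementation (items : List (String × Int)) : List (String × Int) :=
  let sorted := PySem.List.sorted items (fun x => x.1) false   -- shuffle_implementation: items.sort(key=lambda x: x[0])
  pvDictToList (sorted.foldl pvReduceStepA PySem.Dict.empty)

-- ===== PORT B =====
-- merge(l, r): the while-loop appending the smaller-keyed head (summing on equal keys),
-- then the two extends of the leftovers (the base cases)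
def pvMergeB : List (String × Int) → List (String × Int) → List (String × Int)
  | [], r => r
  | a :: l, [] => a :: l
  | a :: l, b :: r =>
    if a.1 < b.1 then a :: pvMergeB l (b :: r)
    else if b.1 < a.1 then b :: pvMergeB (a :: l) r
    else (a.1, a.2 + b.2) :: pvMergeB l r
termination_by l r => l.length + r.length

-- solve(xs): length ≤ 1 is returned as is, else merge the solved halves
def pvSolveB (xs : List (String × Int)) : List (String × Int) :=
  if h : xs.length ≤ 1 then xs
  else
    pvMergeB (pvSolveB (xs.take (xs.length / 2))) (pvSolveB (xs.drop (xs.length / 2)))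
termination_by xs.length
decreasing_by
  · simpa using Nat.lt_of_lt_of_le (Nat.div_lt_self (by omega) (by omega)) (Nat.le_refl _) |>.trans_le (by simp [Nat.min_le_left])
  · simp; omega

def reduce_function_implementation_alt (items : List (String × Int)) : List (String × Int) :=
  pvSolveB items

-- ===== PRECONDITION & SPEC =====
def Spec_reduce_function_implementation (items : List (String × Int)) (out : List (String × Int)) : Prop := out = reduce_function_implementation_alt items
instance (items : List (String × Int)) (out : List (String × Int)) : Decidable (Spec_reduce_function_implementation items out) := by unfold Spec_reduce_function_implementation; infer_instance

-- ===== CLAIM (what is proved, stated in full; the proofs are below) =====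
def Claim_equal_reduce_function_implementation : Prop := ∀ (items : List (String × Int)), Dom_reduce_function_implementation items → Spec_reduce_function_implementation items (reduce_function_implementation items)

-- ===== LEMMAS AND PROOFS =====

-- A's dict loop rephrased as a list loop (proof helper only; B's port does not use it)
def pvReduceStepB (res : List (String × Int)) (p : String × Int) : List (String × Int) :=
  match res.getLast? with
  | some last => if last.1 = p.1 then res.dropLast ++ [(p.1, last.2 + p.2)] else res ++ [p]
  | none => res ++ [p]

-- pvAgg xs k: none if k is not a key of xs, else the sum of the values at key k
def pvAgg : List (String × Int) → String → Option Int
  | [], _ => none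
  | p :: t, k => if p.1 = k then some (p.2 + (pvAgg t k).getD 0) else pvAgg t k

def pvOComb (a b : Option Int) : Option Int :=
  match a with
  | none => b
  | some x => some (x + b.getD 0)

theorem pvOComb_getD (a b : Option Int) : (pvOComb a b).getD 0 = a.getD 0 + b.getD 0 := by
  cases a <;> cases b <;> simp [pvOComb]

theorem pvOComb_assoc (a b c : Option Int) :
    pvOComb (pvOComb a b) c = pvOComb a (pvOComb b c) := by
  cases a <;> cases b <;> cases c <;> simp [pvOComb] <;> ring

theorem pvOComb_none_right (a : Option Int) : pvOComb a none = a := by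
  cases a <;> simp [pvOComb]

theorem pvAgg_append (l r : List (String × Int)) (k : String) :
    pvAgg (l ++ r) k = pvOComb (pvAgg l k) (pvAgg r k) := by
  induction l with
  | nil => simp [pvAgg, pvOComb]
  | cons p t ih =>
    by_cases h : p.1 = k
    · simp [pvAgg, h, ih, pvOComb, pvOComb_getD]
      cases hpt : pvAgg t k <;> cases hr : pvAgg r k <;> simp [pvOComb] <;> ring
    · simp [pvAgg, h, ih]

theorem pvAgg_none_of_not_mem (l : List (String × Int)) (k : String)
    (h : k ∉ l.map Prod.fst) : pvAgg l k = none := by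
  induction l with
  | nil => rfl
  | cons p t ih =>
    have h1 : ¬ p.1 = k := fun he => h (by simp [he])
    have h2 : k ∉ t.map Prod.fst := fun hm => h (List.mem_cons_of_mem _ hm)
    simp [pvAgg, h1, ih h2]

theorem pvAgg_mem_of_ne_none (l : List (String × Int)) (k : String)
    (h : pvAgg l k ≠ none) : k ∈ l.map Prod.fst := by
  by_contra hk
  exact h (pvAgg_none_of_not_mem l k hk)

theorem pvAgg_perm (l l' : List (String × Int)) (hp : l.Perm l') (k : String) :
    pvAgg l k = pvAgg l' k := by
  induction hp with
  | nil => rfl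
  | cons p _ ih => by_cases h : p.1 = k <;> simp [pvAgg, h, ih]
  | swap p q t =>
    by_cases hp1 : p.1 = k <;> by_cases hq1 : q.1 = k <;>
      simp [pvAgg, hp1, hq1] <;> cases pvAgg t k <;> simp <;> ring
  | trans _ _ ih1 ih2 => exact ih1.trans ih2

-- merge: membership of keys
theorem pvMergeB_keys_mem (l r : List (String × Int)) (k : String)
    (h : k ∈ (pvMergeB l r).map Prod.fst) :
    k ∈ l.map Prod.fst ∨ k ∈ r.map Prod.fst := by
  fun_induction pvMergeB l r with
  | case1 r => exact Or.inr h
  | case2 a l => exact Or.inl h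
  | case3 a l b r hlt ih =>
    rw [List.map_cons] at h
    rcases List.mem_cons.mp h with h | h
    · exact Or.inl (by simp [h])
    · rcases ih h with h | h
      · exact Or.inl (List.mem_cons_of_mem _ h)
      · exact Or.inr h
  | case4 a l b r hlt hgt ih =>
    rw [List.map_cons] at h
    rcases List.mem_cons.mp h with h | h
    · exact Or.inr (by simp [h])
    · rcases ih h with h | h
      · exact Or.inl h
      · exact Or.inr (List.mem_cons_of_mem _ h)
  | case5 a l b r hlt hgt ih =>
    rw [List.map_cons] at h
    rcases List.mem_cons.mp h with h | h
    · exact Or.inl (by simp [h])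
    · rcases ih h with h | h
      · exact Or.inl (List.mem_cons_of_mem _ h)
      · exact Or.inr (List.mem_cons_of_mem _ h)

-- merge preserves strict sortedness of keys
theorem pvMergeB_sorted (l r : List (String × Int))
    (hl : (l.map Prod.fst).Pairwise (· < ·)) (hr : (r.map Prod.fst).Pairwise (· < ·)) :
    ((pvMergeB l r).map Prod.fst).Pairwise (· < ·) := by
  fun_induction pvMergeB l r with
  | case1 r => exact hr
  | case2 a l => exact hl
  | case3 a l b r hlt ih =>
    rw [List.map_cons] at hl ⊢
    rw [List.map_cons] at hr
    refine List.pairwise_cons.mpr ⟨?_, ih hl.of_cons (by rw [List.map_cons]; exact hr)⟩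
    intro k hk
    rcases pvMergeB_keys_mem _ _ _ hk with h | h
    · exact List.rel_of_pairwise_cons hl h
    · rw [List.map_cons] at h
      rcases List.mem_cons.mp h with h | h
      · exact h ▸ hlt
      · exact hlt.trans (List.rel_of_pairwise_cons hr h)
  | case4 a l b r hlt hgt ih =>
    rw [List.map_cons] at hl
    rw [List.map_cons] at hr ⊢
    refine List.pairwise_cons.mpr ⟨?_, ih (by rw [List.map_cons]; exact hl) hr.of_cons⟩
    intro k hk
    rcases pvMergeB_keys_mem _ _ _ hk with h | h
    · rw [List.map_cons] at h
      rcases List.mem_cons.mp h with h | h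
      · exact h ▸ hgt
      · exact hgt.trans (List.rel_of_pairwise_cons hl h)
    · exact List.rel_of_pairwise_cons hr h
  | case5 a l b r hlt hgt ih =>
    have hab : a.1 = b.1 := le_antisymm (le_of_not_gt hgt) (le_of_not_gt hlt)
    rw [List.map_cons] at hl hr ⊢
    refine List.pairwise_cons.mpr ⟨?_, ih hl.of_cons hr.of_cons⟩
    intro k hk
    rcases pvMergeB_keys_mem _ _ _ hk with h | h
    · exact List.rel_of_pairwise_cons hl h
    · exact hab ▸ List.rel_of_pairwise_cons hr h

-- merge sums the two aggregates
theorem pvMergeB_agg (l r : List (String × Int)) (k : String) :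
    pvAgg (pvMergeB l r) k = pvOComb (pvAgg l k) (pvAgg r k) := by
  fun_induction pvMergeB l r with
  | case1 r => rfl
  | case2 a l => exact (pvOComb_none_right _).symm
  | case3 a l b r hlt ih =>
    by_cases h : a.1 = k
    · simp only [pvAgg, if_pos h, ih]
      rw [pvOComb_getD]
      cases pvAgg l k <;> cases pvAgg (b :: r) k <;> simp [pvOComb] <;> ring
    · simp [pvAgg, h, ih]
  | case4 a l b r hlt hgt ih =>
    by_cases h : b.1 = k
    · have ha : ¬ a.1 = k := by intro he; rw [he, h] at hgt; exact lt_irrefl _ hgt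
      simp only [pvAgg, if_pos h, if_neg ha, ih]
      rw [pvOComb_getD]
      cases pvAgg l k <;> cases pvAgg r k <;> simp [pvOComb] <;> ring
    · simp [pvAgg, h, ih]
  | case5 a l b r hlt hgt ih =>
    have hab : a.1 = b.1 := le_antisymm (le_of_not_gt hgt) (le_of_not_gt hlt)
    by_cases h : a.1 = k
    · have hb : b.1 = k := hab ▸ h
      simp only [pvAgg, if_pos h, if_pos hb, ih]
      rw [pvOComb_getD]
      cases pvAgg l k <;> cases pvAgg r k <;> simp [pvOComb] <;> ring
    · have hb : ¬ b.1 = k := fun hh => h (hab.trans hh)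
      simp [pvAgg, h, hb, ih]

-- solve: sorted and aggregate-preserving
theorem pvSolveB_spec (xs : List (String × Int)) :
    ((pvSolveB xs).map Prod.fst).Pairwise (· < ·) ∧
    ∀ k, pvAgg (pvSolveB xs) k = pvAgg xs k := by
  fun_induction pvSolveB xs with
  | case1 xs h =>
    constructor
    · match xs, h with
      | [], _ => simp
      | [p], _ => simp
    · intro k; rfl
  | case2 xs h ih1 ih2 =>
    refine ⟨pvMergeB_sorted _ _ ih1.1 ih2.1, fun k => ?_⟩
    rw [pvMergeB_agg, ih1.2 k, ih2.2 k, ← pvAgg_append, List.take_append_drop]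

-- uniqueness: strictly key-sorted lists with the same aggregate are equal
theorem pvUnique (f : List (String × Int)) : ∀ (g : List (String × Int)),
    (f.map Prod.fst).Pairwise (· < ·) → (g.map Prod.fst).Pairwise (· < ·) →
    (∀ k, pvAgg f k = pvAgg g k) → f = g := by
  induction f with
  | nil =>
    intro g _ _ hag
    cases g with
    | nil => rfl
    | cons q u =>
      have := hag q.1
      simp [pvAgg] at this
  | cons p t ih =>
    intro g hf hg hag
    cases g with
    | nil =>
      have := hag p.1
      simp [pvAgg] at this
    | cons q u =>
      obtain ⟨p1, p2⟩ := p
      obtain ⟨q1, q2⟩ := q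
      rw [List.map_cons] at hf hg
      have hmin : ∀ (a1 : String) (v : List String),
          (a1 :: v).Pairwise (· < ·) → ∀ k ∈ a1 :: v, a1 ≤ k := by
        intro a1 v hv k hk
        rcases List.mem_cons.mp hk with hk | hk
        · exact hk.ge
        · exact le_of_lt (List.rel_of_pairwise_cons hv hk)
      have hpg : p1 ∈ ((q1, q2) :: u).map Prod.fst := by
        apply pvAgg_mem_of_ne_none
        rw [← hag p1]; simp [pvAgg]
      have hqf : q1 ∈ ((p1, p2) :: t).map Prod.fst := by
        apply pvAgg_mem_of_ne_none
        rw [hag q1]; simp [pvAgg]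
      have hk1 : p1 = q1 :=
        le_antisymm (hmin p1 (t.map Prod.fst) hf q1 (by simpa using hqf))
          (hmin q1 (u.map Prod.fst) hg p1 (by simpa using hpg))
      subst hk1
      have hpt : pvAgg t p1 = none := pvAgg_none_of_not_mem t p1 (fun h =>
        absurd (List.rel_of_pairwise_cons hf h) (lt_irrefl _))
      have hqu : pvAgg u p1 = none := pvAgg_none_of_not_mem u p1 (fun h =>
        absurd (List.rel_of_pairwise_cons hg h) (lt_irrefl _))
      have hv2 : p2 = q2 := by
        have := hag p1
        simp [pvAgg, hpt, hqu] at this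
        exact this
      have htail : t = u := by
        apply ih u hf.of_cons hg.of_cons
        intro k
        by_cases hk : k = p1
        · rw [hk, hpt, hqu]
        · have hk' : ¬ p1 = k := fun h => hk h.symm
          have := hag k
          simp [pvAgg, hk'] at this
          exact this
      rw [hv2, htail]

-- A's dict loop equals the pvReduceStepB list loop (invariant over the sorted input)
theorem pvMain (s : List (String × Int)) : ∀ (r : List (String × Int)),
    s.Pairwise (fun a b => a.1 ≤ b.1) →
    (r.map Prod.fst).Pairwise (· < ·) →
    (∀ p ∈ s, ∀ q ∈ r, q.1 ≤ p.1) →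
    (s.foldl pvReduceStepA (PySem.Dict.mk r)).items = s.foldl pvReduceStepB r := by
  induction s with
  | nil => intro r _ _ _; rfl
  | cons p rest ih =>
    rintro r hs hr hle
    obtain ⟨k, v⟩ := p
    have hrest : rest.Pairwise (fun a b => a.1 ≤ b.1) := hs.of_cons
    have hklerest : ∀ q ∈ rest, k ≤ q.1 := by
      intro q hq; exact List.rel_of_pairwise_cons hs hq
    have hrlek : ∀ q ∈ r, q.1 ≤ k := fun q hq => hle (k, v) (List.mem_cons_self) q hq
    simp only [List.foldl_cons]
    by_cases hk : k ∈ r.map Prod.fst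
    · rcases List.eq_nil_or_concat r with hnil | ⟨init, last, hsplit⟩
      · subst hnil; simp at hk
      rw [List.concat_eq_append] at hsplit
      subst hsplit
      have hinitlt : ∀ q ∈ init.map Prod.fst, q < last.1 := by
        intro q hq
        have h2 := hr
        rw [List.map_append, List.pairwise_append] at h2
        exact h2.2.2 q hq last.1 (by simp)
      have hlastk : last.1 = k := by
        rw [List.map_append] at hk
        rcases List.mem_append.mp hk with h | h
        · exact absurd (hinitlt k h) (not_lt.mpr (hrlek last (by simp)))
        · simp at h; exact h.symm
      have hcont : (PySem.Dict.mk (init ++ [last])).contains k = true := by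
        rw [PySem.Dict.contains_iff_mem_keys]; exact hk
      have hnodup : ((init ++ [last]).map Prod.fst).Nodup :=
        List.Pairwise.nodup hr
      have hmem : (k, last.2) ∈ init ++ [last] := by
        rw [← hlastk]; simp
      have hgetD : (PySem.Dict.mk (init ++ [last])).getD k 0 = last.2 :=
        PySem.Dict.getD_of_mem_items _ hmem hnodup 0
      have hA : pvReduceStepA (PySem.Dict.mk (init ++ [last])) (k, v)
          = PySem.Dict.mk (init ++ [(k, last.2 + v)]) := by
        simp only [pvReduceStepA, hcont, if_true, hgetD]
        apply PySem.Dict.ext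
        rw [PySem.Dict.items_insert_of_contains (h := hcont)]
        show (init ++ [last]).map _ = _
        rw [List.map_append, List.map_congr_left (g := id) ?_, List.map_id]
        · simp [← hlastk]
        · intro q hq
          have hqne : q.1 ≠ k := by
            intro h
            exact absurd (hinitlt q.1 (List.mem_map_of_mem hq)) (by rw [h, hlastk]; exact lt_irrefl _)
          simp [hqne]
      have hB : pvReduceStepB (init ++ [last]) (k, v)
          = init ++ [(k, last.2 + v)] := by
        simp [pvReduceStepB, hlastk]
      rw [hA, hB]
      apply ih
      · exact hrest
      · rw [List.map_append] at hr ⊢; simpa [← hlastk] using hr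
      · intro p hp q hq
        rcases List.mem_append.mp hq with h | h
        · exact hle p (List.mem_cons_of_mem _ hp) q (by simp [h])
        · simp at h; subst h; exact hklerest p hp
    · have hcont : (PySem.Dict.mk r).contains k = false := by
        rw [Bool.eq_false_iff]
        intro h; exact hk ((PySem.Dict.contains_iff_mem_keys _ _).mp h)
      have hA : pvReduceStepA (PySem.Dict.mk r) (k, v) = PySem.Dict.mk (r ++ [(k, v)]) := by
        rw [pvReduceStepA, hcont]
        simp only [Bool.false_eq_true, if_false]
        apply PySem.Dict.ext
        exact PySem.Dict.items_insert_of_not_contains _ v hcont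
      have hB : pvReduceStepB r (k, v) = r ++ [(k, v)] := by
        unfold pvReduceStepB
        cases hgl : r.getLast? with
        | none => rfl
        | some last =>
          have hlast : last ∈ r := List.mem_of_getLast? hgl
          have hne : last.1 ≠ k := by
            intro h; exact hk (h ▸ List.mem_map_of_mem hlast)
          simp [hne]
      rw [hA, hB]
      apply ih
      · exact hrest
      · rw [List.map_append, List.pairwise_append]
        refine ⟨hr, by simp, ?_⟩
        intro q hq k' hk'
        simp at hk'; subst hk'
        rcases List.mem_map.mp hq with ⟨q', hq', rfl⟩
        exact lt_of_le_of_ne (hrlek q' hq') (fun h => hk (h ▸ List.mem_map_of_mem hq'))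
      · intro p hp q hq
        rcases List.mem_append.mp hq with h | h
        · exact hle p (List.mem_cons_of_mem _ hp) q h
        · simp at h; subst h; exact hklerest p hp

-- the pvReduceStepB loop is sorted and aggregate-preserving
theorem pvFoldB_spec (s : List (String × Int)) : ∀ (r : List (String × Int)),
    s.Pairwise (fun a b => a.1 ≤ b.1) →
    (r.map Prod.fst).Pairwise (· < ·) →
    (∀ p ∈ s, ∀ q ∈ r, q.1 ≤ p.1) →
    (((s.foldl pvReduceStepB r).map Prod.fst).Pairwise (· < ·) ∧
     ∀ k, pvAgg (s.foldl pvReduceStepB r) k = pvAgg (r ++ s) k) := by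
  induction s with
  | nil => intro r _ hr _; exact ⟨hr, by simp⟩
  | cons p rest ih =>
    rintro r hs hr hle
    obtain ⟨k, v⟩ := p
    have hrest : rest.Pairwise (fun a b => a.1 ≤ b.1) := hs.of_cons
    have hklerest : ∀ q ∈ rest, k ≤ q.1 := by
      intro q hq; exact List.rel_of_pairwise_cons hs hq
    have hrlek : ∀ q ∈ r, q.1 ≤ k := fun q hq => hle (k, v) (List.mem_cons_self) q hq
    simp only [List.foldl_cons]
    -- r' := one step; in both branches pvAgg r' k' = pvOComb (pvAgg r k') (pvAgg [(k,v)] k')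
    have key : ∃ r', pvReduceStepB r (k, v) = r' ∧
        ((r'.map Prod.fst).Pairwise (· < ·)) ∧
        (∀ q ∈ r', q.1 ≤ k) ∧
        (∀ k', pvAgg r' k' = pvOComb (pvAgg r k') (pvAgg [(k, v)] k')) := by
      by_cases hk : k ∈ r.map Prod.fst
      · rcases List.eq_nil_or_concat r with hnil | ⟨init, last, hsplit⟩
        · subst hnil; simp at hk
        rw [List.concat_eq_append] at hsplit
        subst hsplit
        have hinitlt : ∀ q ∈ init.map Prod.fst, q < last.1 := by
          intro q hq
          have h2 := hr
          rw [List.map_append, List.pairwise_append] at h2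
          exact h2.2.2 q hq last.1 (by simp)
        have hlastk : last.1 = k := by
          rw [List.map_append] at hk
          rcases List.mem_append.mp hk with h | h
          · exact absurd (hinitlt k h) (not_lt.mpr (hrlek last (by simp)))
          · simp at h; exact h.symm
        refine ⟨init ++ [(k, last.2 + v)], by simp [pvReduceStepB, hlastk], ?_, ?_, ?_⟩
        · rw [List.map_append] at hr ⊢; simpa [← hlastk] using hr
        · intro q hq
          rcases List.mem_append.mp hq with h | h
          · exact hrlek q (List.mem_append_left _ h)
          · simp at h; simp [h]
        · intro k'
          rw [pvAgg_append, pvAgg_append]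
          by_cases hkk : k = k'
          · subst hkk
            rw [pvAgg_none_of_not_mem init k (fun h => absurd (hinitlt k h) (by simp [hlastk]))]
            simp [pvAgg, pvOComb, hlastk]
            try ring
          · have hne : ¬ last.1 = k' := fun h => hkk (hlastk ▸ h)
            have e1 : pvAgg [(k, last.2 + v)] k' = none := by simp [pvAgg, hkk]
            have e2 : pvAgg [last] k' = none := by simp [pvAgg, hne]
            have e3 : pvAgg [(k, v)] k' = none := by simp [pvAgg, hkk]
            simp [e1, e2, e3, pvOComb_none_right]
      · refine ⟨r ++ [(k, v)], ?_, ?_, ?_, fun k' => pvAgg_append _ _ _⟩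
        · unfold pvReduceStepB
          cases hgl : r.getLast? with
          | none => rfl
          | some last =>
            have hlast : last ∈ r := List.mem_of_getLast? hgl
            have hne : last.1 ≠ k := fun h => hk (h ▸ List.mem_map_of_mem hlast)
            simp [hne]
        · rw [List.map_append, List.pairwise_append]
          refine ⟨hr, by simp, ?_⟩
          intro q hq k' hk'
          simp at hk'; subst hk'
          rcases List.mem_map.mp hq with ⟨q', hq', rfl⟩
          exact lt_of_le_of_ne (hrlek q' hq') (fun h => hk (h ▸ List.mem_map_of_mem hq'))
        · intro q hq
          rcases List.mem_append.mp hq with h | h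
          · exact hrlek q h
          · simp at h; simp [h]
    obtain ⟨r', hstep, hr', hle', hagg'⟩ := key
    rw [hstep]
    have := ih r' hrest hr' (fun p hp q hq => (hle' q hq).trans (hklerest p hp))
    refine ⟨this.1, fun k' => ?_⟩
    rw [this.2 k', pvAgg_append, hagg' k', pvOComb_assoc, ← pvAgg_append, ← pvAgg_append]
    simp

-- ===== VERDICT (by name: the statement is the Claim_ definition above) =====
theorem reduce_function_implementation_spec : Claim_equal_reduce_function_implementation := by
  intro items _
  show _ = _
  have hA : reduce_function_implementation items
      = (PySem.List.sorted items (fun x => x.1) false).foldl pvReduceStepB [] := by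
    unfold reduce_function_implementation pvDictToList
    rw [PySem.List.foldl_append_singleton]
    exact pvMain _ [] (PySem.List.sorted_pairwise items _) (by simp) (by simp)
  have hs := PySem.List.sorted_pairwise items (fun x => x.1)
  have hF := pvFoldB_spec (PySem.List.sorted items (fun x => x.1) false) []
    hs (by simp) (by simp)
  have hB := pvSolveB_spec items
  rw [hA]
  apply pvUnique _ _ hF.1 hB.1
  intro k
  rw [hF.2 k, hB.2 k]
  simpa using pvAgg_perm _ _ (PySem.List.sorted_perm items (fun x => x.1) false) k
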